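-- pv_equiv track=rewrite | github.com/tayloh/tellodrone | movement_model.py | get_aux_action_vector
-- ===== SOURCE A (Python) =====
-- def get_aux_action_vector(actions):
--         vector = [0, 0, 0, 0, 0]
--         for action in actions:
--
--             # land/takeoff
--             if action == "takeoff":
--                 vector[0] = 1
--             elif action == "land":
--                 vector[1] = 1
--
--             if action == "backflip":
--                 vector[2] = 1
--
--             if action == "exit":
--                 vector[3] = 1
--
--             if action == "swapcam":
--                 vector[4] = 1
--
--         return vector[0], vector[1], vector[2], vector[3], vector[4]
-- ===== SOURCE B (Python) =====
-- def get_aux_action_vector(actions):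
--     return (
--         int("takeoff" in actions),
--         int("land" in actions),
--         int("backflip" in actions),
--         int("exit" in actions),
--         int("swapcam" in actions),
--     )
-- ===== Notes on version B (the rewrite author's own statement) =====
-- stated objective: idiomatic
-- what changed: Replaces the single pass with a mutable 5-slot vector by five independent membership tests, one per flag, with no loop or shared state.
import Mathlib
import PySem

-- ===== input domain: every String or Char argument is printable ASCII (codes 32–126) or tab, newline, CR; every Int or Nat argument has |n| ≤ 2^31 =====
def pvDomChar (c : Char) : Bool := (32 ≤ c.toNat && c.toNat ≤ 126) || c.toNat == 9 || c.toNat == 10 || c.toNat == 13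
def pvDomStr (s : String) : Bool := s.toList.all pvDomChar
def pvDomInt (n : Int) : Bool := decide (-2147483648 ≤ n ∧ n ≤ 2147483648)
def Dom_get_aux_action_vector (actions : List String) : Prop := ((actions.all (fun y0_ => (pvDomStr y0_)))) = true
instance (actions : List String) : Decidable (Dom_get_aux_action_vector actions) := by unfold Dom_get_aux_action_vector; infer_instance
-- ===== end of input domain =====

-- B replaces A's loop over a mutable 5-slot vector with five independent membership tests (idiomatic).


-- ===== PORT A =====
-- one loop step of A: the if/elif chain mutating the five slots in order
def auxStepA (v : Int × Int × Int × Int × Int) (action : String) : Int × Int × Int × Int × Int :=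
  let (v0, v1, v2, v3, v4) := v
  let (v0, v1) := if action = "takeoff" then ((1 : Int), v1)
                  else if action = "land" then (v0, (1 : Int)) else (v0, v1)
  let v2 := if action = "backflip" then (1 : Int) else v2
  let v3 := if action = "exit" then (1 : Int) else v3
  let v4 := if action = "swapcam" then (1 : Int) else v4
  (v0, v1, v2, v3, v4)

def get_aux_action_vector (actions : List String) : Int × Int × Int × Int × Int :=
  actions.foldl auxStepA (0, 0, 0, 0, 0)

-- ===== PORT B =====
def b2i (b : Bool) : Int := if b then 1 else 0

def get_aux_action_vector_alt (actions : List String) : Int × Int × Int × Int × Int :=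
  (b2i (actions.contains "takeoff"),
   b2i (actions.contains "land"),
   b2i (actions.contains "backflip"),
   b2i (actions.contains "exit"),
   b2i (actions.contains "swapcam"))

-- ===== PRECONDITION & SPEC =====
def Spec_get_aux_action_vector (actions : List String) (out : Int × Int × Int × Int × Int) : Prop := out = get_aux_action_vector_alt actions
instance (actions : List String) (out : Int × Int × Int × Int × Int) : Decidable (Spec_get_aux_action_vector actions out) := by unfold Spec_get_aux_action_vector; infer_instance

-- ===== CLAIM (what is proved, stated in full; the proofs are below) =====
def Claim_equal_get_aux_action_vector : Prop := ∀ (actions : List String), Dom_get_aux_action_vector actions → Spec_get_aux_action_vector actions (get_aux_action_vector actions)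

-- ===== LEMMAS AND PROOFS =====
theorem foldA_char (actions : List String) (v0 v1 v2 v3 v4 : Int) :
    actions.foldl auxStepA (v0, v1, v2, v3, v4) =
      (if actions.contains "takeoff" then 1 else v0,
       if actions.contains "land" then 1 else v1,
       if actions.contains "backflip" then 1 else v2,
       if actions.contains "exit" then 1 else v3,
       if actions.contains "swapcam" then 1 else v4) := by
  induction actions generalizing v0 v1 v2 v3 v4 with
  | nil => simp
  | cons a tl ih =>
    simp only [List.foldl_cons, List.contains_cons, auxStepA]
    rw [ih]
    simp only [Bool.or_eq_true, beq_iff_eq, Prod.mk.injEq]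
    refine ⟨?_, ?_, ?_, ?_, ?_⟩
    · by_cases h0 : a = "takeoff"
      · subst h0; simp
      · by_cases h1 : a = "land"
        · subst h1; simp
        · simp [h0, h1, Ne.symm h0]
    · by_cases h0 : a = "takeoff"
      · subst h0; simp
      · by_cases h1 : a = "land"
        · subst h1; simp
        · simp [h0, h1, Ne.symm h1]
    · by_cases h : a = "backflip"
      · subst h; simp
      · simp [h, Ne.symm h]
    · by_cases h : a = "exit"
      · subst h; simp
      · simp [h, Ne.symm h]
    · by_cases h : a = "swapcam"
      · subst h; simp
      · simp [h, Ne.symm h]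

-- ===== VERDICT (by name: the statement is the Claim_ definition above) =====
theorem get_aux_action_vector_spec : Claim_equal_get_aux_action_vector := by
  intro actions _
  unfold Spec_get_aux_action_vector get_aux_action_vector get_aux_action_vector_alt b2i
  rw [foldA_char]
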